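-- pv_equiv track=rewrite | github.com/dally96/DisplacedTauAnalysis | tau_func.py | stauMother
-- ===== SOURCE A (Python) =====
-- def stauMother(event, partIdx, genPart, genPartIdxMother):
--   if abs(genPart[event][partIdx]) == 15:
--     motherIdx = genPartIdxMother[event][partIdx]
--     if abs(genPart[event][motherIdx]) == 1000015:
--       return 1
--     elif abs(genPart[event][motherIdx]) == 15:
--       return stauMother(event, motherIdx, genPart, genPartIdxMother)
--     else:
--       return 0
--   if partIdx == -1:
--     return 0
-- ===== SOURCE B (Python) =====
-- def stauMother(event, partIdx, genPart, genPartIdxMother):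
--     if abs(genPart[event][partIdx]) != 15:
--         return 0 if partIdx == -1 else None
--     gp = genPart[event]
--     gm = genPartIdxMother[event]
--     i = partIdx
--     while True:
--         m = gm[i]
--         pid = abs(gp[m])
--         if pid == 1000015:
--             return 1
--         if pid != 15:
--             return 0
--         i = m
-- ===== Notes on version B (the rewrite author's own statement) =====
-- stated objective: simpler
-- what changed: A's tail recursion is rewritten as a single explicit while-loop over the current index, with the tau test and the None / partIdx == -1 fall-through handled once up front instead of on every recursive call.
-- outside the precondition, e.g. on stauMother(0, 0, [[15, 1000015]], [[1, 0]]): A returns 1, B returns 1; on stauMother(0, 0, [[16], [15]], [[]]): A returns None, B returns None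
import Mathlib
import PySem

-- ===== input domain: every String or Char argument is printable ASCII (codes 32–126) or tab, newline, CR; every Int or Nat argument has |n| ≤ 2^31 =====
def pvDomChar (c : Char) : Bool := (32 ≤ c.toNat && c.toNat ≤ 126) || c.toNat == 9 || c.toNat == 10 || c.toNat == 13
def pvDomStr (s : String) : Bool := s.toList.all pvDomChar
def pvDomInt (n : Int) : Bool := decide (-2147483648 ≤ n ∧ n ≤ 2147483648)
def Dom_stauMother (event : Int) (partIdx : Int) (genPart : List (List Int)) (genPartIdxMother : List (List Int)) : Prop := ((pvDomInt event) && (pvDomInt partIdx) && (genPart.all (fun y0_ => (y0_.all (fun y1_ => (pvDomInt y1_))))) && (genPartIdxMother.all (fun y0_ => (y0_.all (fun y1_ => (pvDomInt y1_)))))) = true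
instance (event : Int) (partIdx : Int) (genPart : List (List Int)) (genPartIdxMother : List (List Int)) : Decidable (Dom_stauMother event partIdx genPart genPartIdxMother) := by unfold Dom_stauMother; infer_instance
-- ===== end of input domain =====

-- B rewrites A's tail recursion as a single while-loop over the current index, with the
-- tau test (and the None / partIdx == -1 fall-through) handled once up front; same
-- return values, no speed claim.

-- ===== PORT A =====
-- Python A is recursive; the recursion is ported with a fuel parameter (fuel only makes
-- the recursion total — on every input admitted by Pre_ the fuel is never exhausted).
def stauMotherFuel : Nat → Int → Int → List (List Int) → List (List Int) → Option Int
  | 0, _, _, _, _ => none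
  | fuel+1, event, partIdx, genPart, genPartIdxMother =>
    match PySem.List.pyGet? genPart event with
    | none => none           -- IndexError (excluded by Pre_)
    | some row =>
      match PySem.List.pyGet? row partIdx with
      | none => none         -- IndexError (excluded by Pre_)
      | some pid =>
        if pid.natAbs = 15 then
          match PySem.List.pyGet? genPartIdxMother event with
          | none => none     -- IndexError (excluded by Pre_)
          | some mrow =>
            match PySem.List.pyGet? mrow partIdx with
            | none => none   -- IndexError (excluded by Pre_)
            | some motherIdx =>
              match PySem.List.pyGet? row motherIdx with
              | none => none -- IndexError (excluded by Pre_)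
              | some mpid =>
                if mpid.natAbs = 1000015 then some 1
                else if mpid.natAbs = 15 then
                  stauMotherFuel fuel event motherIdx genPart genPartIdxMother
                else some 0
        else if partIdx = -1 then some 0 else none   -- Python's implicit `return None`

def stauMother (event : Int) (partIdx : Int) (genPart : List (List Int)) (genPartIdxMother : List (List Int)) : Option Int :=
  stauMotherFuel
    ((match PySem.List.pyGet? genPart event with | some row => row.length | none => 0) + 1)
    event partIdx genPart genPartIdxMother

-- ===== PORT B =====
-- the `while True` loop of Source B (fuel again only for totality; never exhausted under Pre_)
def stauLoop : Nat → List Int → List Int → Int → Option Int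
  | 0, _, _, _ => none
  | fuel+1, gp, gm, i =>
    match PySem.List.pyGet? gm i with
    | none => none           -- IndexError (excluded by Pre_)
    | some m =>
      match PySem.List.pyGet? gp m with
      | none => none         -- IndexError (excluded by Pre_)
      | some v =>
        if v.natAbs = 1000015 then some 1
        else if v.natAbs ≠ 15 then some 0
        else stauLoop fuel gp gm m

def stauMother_alt (event : Int) (partIdx : Int) (genPart : List (List Int)) (genPartIdxMother : List (List Int)) : Option Int :=
  match PySem.List.pyGet? genPart event with
  | none => none
  | some gp =>
    match PySem.List.pyGet? gp partIdx with
    | none => none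
    | some pid =>
      if pid.natAbs ≠ 15 then (if partIdx = -1 then some 0 else none)
      else
        match PySem.List.pyGet? genPartIdxMother event with
        | none => none
        | some gm => stauLoop (gp.length + 1) gp gm partIdx

-- ===== PRECONDITION & SPEC =====
-- Pre_ excludes inputs where A raises IndexError or recurses forever, and — because
-- termination of the mother chain is not a closed-form condition — it restricts to the
-- physical GenPart layout (both event rows exist and have equal length, partIdx is a
-- valid Python index, and every tau's mother index satisfies 0 ≤ mother < i, i.e.
-- mothers precede daughters); this also excludes some inputs on which A still returns
-- (chains that stray from that layout yet happen to terminate — see the cited examples).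
def preCheck (event : Int) (partIdx : Int) (genPart : List (List Int)) (genPartIdxMother : List (List Int)) : Bool :=
  match PySem.List.pyGet? genPart event, PySem.List.pyGet? genPartIdxMother event with
  | some gp, some gm =>
      gm.length == gp.length &&
      decide (-(gp.length : Int) ≤ partIdx) && decide (partIdx < (gp.length : Int)) &&
      (List.range gp.length).all (fun i =>
        !((gp.getD i 0).natAbs == 15) ||
        (decide (0 ≤ gm.getD i 0) && decide (gm.getD i 0 < (i : Int))))
  | _, _ => false

def Pre_stauMother (event : Int) (partIdx : Int) (genPart : List (List Int)) (genPartIdxMother : List (List Int)) : Prop :=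
  preCheck event partIdx genPart genPartIdxMother = true
instance (event : Int) (partIdx : Int) (genPart : List (List Int)) (genPartIdxMother : List (List Int)) : Decidable (Pre_stauMother event partIdx genPart genPartIdxMother) := by unfold Pre_stauMother; infer_instance

def pvWitness_stauMother : Int × Int × List (List Int) × List (List Int) :=
  (0, 2, [[1000015, 15, -15]], [[-1, 0, 1]])

def Spec_stauMother (event : Int) (partIdx : Int) (genPart : List (List Int)) (genPartIdxMother : List (List Int)) (out : Option Int) : Prop := out = stauMother_alt event partIdx genPart genPartIdxMother
instance (event : Int) (partIdx : Int) (genPart : List (List Int)) (genPartIdxMother : List (List Int)) (out : Option Int) : Decidable (Spec_stauMother event partIdx genPart genPartIdxMother out) := by unfold Spec_stauMother; infer_instance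

-- ===== CLAIM (what is proved, stated in full; the proofs are below) =====
def Claim_equal_stauMother : Prop := ∀ (event : Int) (partIdx : Int) (genPart : List (List Int)) (genPartIdxMother : List (List Int)), Dom_stauMother event partIdx genPart genPartIdxMother → Pre_stauMother event partIdx genPart genPartIdxMother → Spec_stauMother event partIdx genPart genPartIdxMother (stauMother event partIdx genPart genPartIdxMother)

-- ===== LEMMAS AND PROOFS =====

-- a Python index in [-len, len) reads the element at its normalised non-negative position
theorem pyGet?_eq_getD_norm (xs : List Int) (i : Int)
    (h1 : -(xs.length : Int) ≤ i) (h2 : i < xs.length) :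
    PySem.List.pyGet? xs i
      = some (xs.getD (if i < 0 then ((xs.length : Int) + i).toNat else i.toNat) 0) := by
  by_cases hi : i < 0
  · simp only [hi, if_true]
    rw [show i = -(((-i).toNat : Nat) : Int) by omega]
    rw [PySem.List.pyGet?_neg_natCast _ _ (by omega) (by omega)]
    rw [List.getElem?_eq_getElem (by omega)]
    rw [List.getD_eq_getElem?_getD, List.getElem?_eq_getElem (by omega)]
    simp
    congr 1
    omega
  · simp only [hi, if_false]
    rw [PySem.List.pyGet?_of_nonneg _ (by omega : (0:Int) ≤ i)]
    rw [List.getElem?_eq_getElem (by omega), List.getD_eq_getElem?_getD, List.getElem?_eq_getElem (by omega)]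
    simp

-- the core agreement: once a tau has been found at a position whose normalised index is j,
-- A's recursion and B's loop agree whenever both fuels exceed j
theorem loop_eq (event : Int) (genPart genPartIdxMother : List (List Int))
    (gp gm : List Int)
    (hgp : PySem.List.pyGet? genPart event = some gp)
    (hgm : PySem.List.pyGet? genPartIdxMother event = some gm)
    (hlen : gm.length = gp.length)
    (hinv : ∀ i : Nat, i < gp.length → (gp.getD i 0).natAbs = 15 →
            0 ≤ gm.getD i 0 ∧ gm.getD i 0 < (i : Int)) :
    ∀ (j : Nat) (i : Int) (fa fb : Nat),
      j < gp.length →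
      PySem.List.pyGet? gp i = some (gp.getD j 0) →
      PySem.List.pyGet? gm i = some (gm.getD j 0) →
      (gp.getD j 0).natAbs = 15 → j < fa → j < fb →
      stauMotherFuel fa event i genPart genPartIdxMother = stauLoop fb gp gm i := by
  intro j
  induction j using Nat.strong_induction_on with
  | _ j IH =>
    intro i fa fb hj hpi hmi h15 hfa hfb
    obtain ⟨fa', rfl⟩ : ∃ fa', fa = fa' + 1 := ⟨fa - 1, by omega⟩
    obtain ⟨fb', rfl⟩ : ∃ fb', fb = fb' + 1 := ⟨fb - 1, by omega⟩
    have hm := hinv j hj h15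
    set m := gm.getD j 0 with hmdef
    have hmlt : m.toNat < j := by omega
    have hpm : PySem.List.pyGet? gp m = some (gp.getD m.toNat 0) := by
      rw [show m = ((m.toNat : Nat) : Int) by omega, PySem.List.pyGet?_natCast,
        List.getElem?_eq_getElem (by omega), List.getD_eq_getElem?_getD,
        List.getElem?_eq_getElem (by omega)]
      simp only [Option.getD_some, Option.some.injEq]
      congr 2
      omega
    rw [stauMotherFuel, stauLoop]
    simp only [hgp, hgm, hpi, hmi, hpm, h15, if_true]
    have hgmm : PySem.List.pyGet? gm m = some (gm.getD m.toNat 0) := by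
      rw [show m = ((m.toNat : Nat) : Int) by omega, PySem.List.pyGet?_natCast,
        List.getElem?_eq_getElem (by omega), List.getD_eq_getElem?_getD,
        List.getElem?_eq_getElem (by omega)]
      simp only [Option.getD_some, Option.some.injEq]
      congr 2
      omega
    by_cases h1 : (gp.getD m.toNat 0).natAbs = 1000015
    · rw [if_pos h1, if_pos h1]
    · rw [if_neg h1, if_neg h1]
      by_cases h2 : (gp.getD m.toNat 0).natAbs = 15
      · rw [if_pos h2, if_neg (not_not_intro h2)]
        exact IH m.toNat hmlt m fa' fb' (by omega) hpm hgmm h2 (by omega) (by omega)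
      · rw [if_neg h2, if_pos h2]

-- ===== VERDICT (by name: the statement is the Claim_ definition above) =====
theorem stauMother_spec : Claim_equal_stauMother := by
  intro event partIdx genPart genPartIdxMother _ hpre
  unfold Spec_stauMother
  unfold Pre_stauMother preCheck at hpre
  cases hgp : PySem.List.pyGet? genPart event with
  | none => rw [hgp] at hpre; cases PySem.List.pyGet? genPartIdxMother event <;> simp at hpre
  | some gp =>
    cases hgm : PySem.List.pyGet? genPartIdxMother event with
    | none => rw [hgp, hgm] at hpre; simp at hpre
    | some gm =>
      rw [hgp, hgm] at hpre
      simp only [Bool.and_eq_true, beq_iff_eq, decide_eq_true_eq, List.all_eq_true,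
        List.mem_range, Bool.or_eq_true, Bool.not_eq_eq_eq_not, Bool.not_true,
        beq_eq_false_iff_ne, ne_eq] at hpre
      obtain ⟨⟨⟨hlen, hb1⟩, hb2⟩, hinvB⟩ := hpre
      have hinv : ∀ i : Nat, i < gp.length → (gp.getD i 0).natAbs = 15 →
          0 ≤ gm.getD i 0 ∧ gm.getD i 0 < (i : Int) := by
        intro i hi h15
        rcases hinvB i hi with h | h
        · exact absurd h15 h
        · exact h
      set j := (if partIdx < 0 then ((gp.length : Int) + partIdx).toNat else partIdx.toNat)
        with hjdef
      have hjlt : j < gp.length := by rw [hjdef]; split <;> omega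
      have hpg : PySem.List.pyGet? gp partIdx = some (gp.getD j 0) :=
        pyGet?_eq_getD_norm gp partIdx hb1 hb2
      have hmg : PySem.List.pyGet? gm partIdx = some (gm.getD j 0) := by
        have h := pyGet?_eq_getD_norm gm partIdx (by omega) (by omega)
        rw [hlen] at h
        exact h
      unfold stauMother stauMother_alt
      rw [hgp]
      simp only [hpg]
      by_cases h15 : (gp.getD j 0).natAbs = 15
      · rw [if_neg (not_not_intro h15), hgm]
        exact loop_eq event genPart genPartIdxMother gp gm hgp hgm hlen hinv j partIdx
          (gp.length + 1) (gp.length + 1) hjlt hpg hmg h15 (by omega) (by omega)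
      · rw [if_pos (by exact h15), stauMotherFuel]
        simp only [hgp, hpg, h15, if_false]
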